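-- pv_equiv track=rewrite | github.com/MrBrantCode/unitest_baseline | mut_generate/mist_train_cf/cf_18341/solution.py | count_or_sum
-- ===== SOURCE A (Python) =====
-- def count_or_sum(arr, target, count_threshold):
--     """
--     This function takes a list of integers, a target integer, and a count threshold.
--     It returns the target number if it appears more than the count threshold times in the array.
--     If the target number appears less than or equal to the count threshold times, it returns the sum of all the numbers in the array.
--     If the target number does not appear in the array, it returns None.
--
--     Parameters:
--     arr (list): A list of integers.
--     target (int): The target integer to be searched in the array.
--     count_threshold (int): The threshold for the count of the target number.
--
--     Returns:
--     int or None: The target number, the sum of the array, or None.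
--     """
--     count_dict = {}
--     total_sum = 0
--
--     # Count the occurrence of each number in the array and calculate the sum
--     for num in arr:
--         if num in count_dict:
--             count_dict[num] += 1
--         else:
--             count_dict[num] = 1
--         total_sum += num
--
--     # Check if the target number appears more than the count threshold times
--     if target in count_dict and count_dict[target] > count_threshold:
--         return target
--     # If the target number appears less than or equal to the count threshold times, return the sum of the array
--     elif target in count_dict:
--         return total_sum
--     # If the target number does not appear in the array, return None
--     else:
--         return None
-- ===== SOURCE B (Python) =====
-- def _bisect_left(s, x):
--     lo, hi = 0, len(s)
--     while lo < hi:
--         mid = (lo + hi) // 2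
--         if s[mid] < x:
--             lo = mid + 1
--         else:
--             hi = mid
--     return lo
--
--
-- def _bisect_right(s, x):
--     lo, hi = 0, len(s)
--     while lo < hi:
--         mid = (lo + hi) // 2
--         if x < s[mid]:
--             hi = mid
--         else:
--             lo = mid + 1
--     return lo
--
--
-- def count_or_sum(arr, target, count_threshold):
--     # Sort, then binary-search the run of `target`: its width is the count.
--     s = sorted(arr)
--     lo = _bisect_left(s, target)
--     hi = _bisect_right(s, target)
--     if lo == hi:
--         return None
--     if hi - lo > count_threshold:
--         return target
--     return sum(arr)
-- ===== Notes on version B (the rewrite author's own statement) =====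
-- stated objective: alternative
-- what changed: Replaces A's frequency-dictionary + running-sum pass with sort-then-binary-search: B sorts the array and bisects the run of the target (hand-written bisect_left/bisect_right), deciding presence and count from the run width; no frequency table or counting loop exists in B.
import Mathlib
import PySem

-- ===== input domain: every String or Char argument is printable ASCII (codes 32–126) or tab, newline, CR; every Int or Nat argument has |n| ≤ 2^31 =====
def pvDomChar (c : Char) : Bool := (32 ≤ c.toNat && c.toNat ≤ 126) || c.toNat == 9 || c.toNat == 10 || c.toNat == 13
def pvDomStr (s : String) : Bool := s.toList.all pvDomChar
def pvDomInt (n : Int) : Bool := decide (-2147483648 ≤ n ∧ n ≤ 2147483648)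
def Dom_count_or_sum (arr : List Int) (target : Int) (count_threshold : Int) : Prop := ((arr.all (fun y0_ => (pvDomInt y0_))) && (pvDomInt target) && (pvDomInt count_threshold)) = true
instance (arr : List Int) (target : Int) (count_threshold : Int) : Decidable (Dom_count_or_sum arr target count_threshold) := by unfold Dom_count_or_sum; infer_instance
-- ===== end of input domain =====

-- B replaces A's frequency-dict/running-sum pass with sort + binary search on the run of the target (alternative algorithm, not faster).

-- ===== PORT A =====
-- Faithful port of A: fold building the count dict and running sum, then the branch chain.
def count_or_sum (arr : List Int) (target : Int) (count_threshold : Int) : Option Int :=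
  let st := arr.foldl
    (fun (st : PySem.Dict Int Int × Int) num =>
      let d := if st.1.contains num then st.1.modify num 0 (· + 1) else st.1.insert num 1
      (d, st.2 + num))
    (PySem.Dict.empty, 0)
  if st.1.contains target && decide (st.1.getD target 0 > count_threshold) then some target
  else if st.1.contains target then some st.2
  else none

-- ===== PORT B =====
-- Source B's _bisect_left/_bisect_right are the textbook bisect loops, which PySem.List.bisectLeft /
-- bisectRight implement step for step (same lo/hi halving, same comparison, same mid = (lo+hi)//2),
-- so they are ported as those prelude primitives.
def count_or_sum_alt (arr : List Int) (target : Int) (count_threshold : Int) : Option Int :=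
  let s := PySem.List.sorted arr (fun x => x) false
  let lo := PySem.List.bisectLeft s target
  let hi := PySem.List.bisectRight s target
  if lo = hi then none
  else if (hi : Int) - (lo : Int) > count_threshold then some target
  else some arr.sum

-- ===== PRECONDITION & SPEC =====
def Spec_count_or_sum (arr : List Int) (target : Int) (count_threshold : Int) (out : Option Int) : Prop := out = count_or_sum_alt arr target count_threshold
instance (arr : List Int) (target : Int) (count_threshold : Int) (out : Option Int) : Decidable (Spec_count_or_sum arr target count_threshold out) := by unfold Spec_count_or_sum; infer_instance

-- ===== CLAIM (what is proved, stated in full; the proofs are below) =====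
def Claim_equal_count_or_sum : Prop := ∀ (arr : List Int) (target : Int) (count_threshold : Int), Dom_count_or_sum arr target count_threshold → Spec_count_or_sum arr target count_threshold (count_or_sum arr target count_threshold)

-- ===== LEMMAS AND PROOFS =====

-- A-side: the dict insert on a fresh key equals the modify-with-default step.
lemma insert_eq_modify (d : PySem.Dict Int Int) (x : Int) (h : d.contains x = false) :
    d.insert x 1 = d.modify x 0 (· + 1) := by
  have hn : d.get? x = none := by
    rw [PySem.Dict.get?_eq_none_iff_contains, h]
  have hg : d.getD x 0 = 0 := by simp [PySem.Dict.getD, hn]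
  simp [PySem.Dict.modify, PySem.Dict.insert, hg]

lemma loop_eq (arr : List Int) (d : PySem.Dict Int Int) (s : Int) :
    arr.foldl
      (fun (st : PySem.Dict Int Int × Int) num =>
        let d := if st.1.contains num then st.1.modify num 0 (· + 1) else st.1.insert num 1
        (d, st.2 + num))
      (d, s)
    = (arr.foldl (fun d x => d.modify x 0 (· + 1)) d, s + arr.sum) := by
  induction arr generalizing d s with
  | nil => simp
  | cons x xs ih =>
    simp only [List.foldl_cons, List.sum_cons]
    rw [ih]
    refine Prod.ext ?_ (by dsimp; omega)
    dsimp
    congr 1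
    by_cases h : d.contains x = true
    · simp [h]
    · simp only [Bool.not_eq_true] at h
      simp [h, insert_eq_modify d x h]

-- countP of a prefix-characterised predicate.
lemma countP_eq_of_prefix (s : List Int) (p : Int → Bool) (k : Nat) (hk : k ≤ s.length)
    (h : ∀ j (hj : j < s.length), p s[j] = true ↔ j < k) : s.countP p = k := by
  induction s generalizing k with
  | nil => simpa using (Nat.le_zero.mp hk).symm
  | cons a t ih =>
    cases k with
    | zero =>
      have ha : p a = false := by
        have := h 0 (by simp)
        simpa using this
      have ht : t.countP p = 0 := by
        refine ih 0 (Nat.zero_le _) ?_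
        intro j hj
        have := h (j+1) (by simpa using Nat.succ_lt_succ hj)
        simpa using this
      simp [ha, ht]
    | succ k' =>
      have ha : p a = true := by
        have := h 0 (by simp)
        simpa using this
      have ht : t.countP p = k' := by
        refine ih k' (by simpa using hk) ?_
        intro j hj
        have := h (j+1) (by simpa using Nat.succ_lt_succ hj)
        simpa [Nat.succ_lt_succ_iff] using this
      simp [ha, ht]

-- countP (≤ x) splits as countP (< x) + count x.
lemma countP_le_split (s : List Int) (x : Int) :
    s.countP (fun a => decide (a ≤ x)) = s.countP (fun a => decide (a < x)) + s.count x := by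
  induction s with
  | nil => simp
  | cons a t ih =>
    rcases lt_trichotomy a x with h | h | h
    · simp [ih, h, h.le, h.ne]
      omega
    · subst h
      simp [ih]
      omega
    · simp [ih, h.ne', not_lt_of_gt h, not_le_of_gt h]

-- On the sorted copy, bisectLeft counts the elements < x and bisectRight those ≤ x.
lemma bisect_counts (s : List Int) (x : Int) (hs : s.Pairwise (· ≤ ·)) :
    s.countP (fun a => decide (a < x)) = PySem.List.bisectLeft s x ∧
    s.countP (fun a => decide (a ≤ x)) = PySem.List.bisectRight s x := by
  obtain ⟨hl1, hl2, hl3⟩ := PySem.List.bisectLeft_spec s x hs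
  obtain ⟨hr1, hr2, hr3⟩ := PySem.List.bisectRight_spec s x hs
  constructor
  · refine countP_eq_of_prefix s _ _ hl1 ?_
    intro j hj
    constructor
    · intro hp
      by_contra hge
      exact absurd (hl3 j hj (Nat.le_of_not_lt hge)) (by simpa using hp)
    · intro hlt
      simpa using hl2 j hj hlt
  · refine countP_eq_of_prefix s _ _ hr1 ?_
    intro j hj
    constructor
    · intro hp
      by_contra hge
      exact absurd (hr3 j hj (Nat.le_of_not_lt hge)) (by simpa using hp)
    · intro hlt
      simpa using hr2 j hj hlt

-- The run width in the sorted copy is the count of the target in arr.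
lemma run_width (arr : List Int) (target : Int) :
    PySem.List.bisectRight (PySem.List.sorted arr (fun x => x) false) target
      = PySem.List.bisectLeft (PySem.List.sorted arr (fun x => x) false) target
        + arr.count target := by
  set s := PySem.List.sorted arr (fun x => x) false with hsdef
  have hp : s.Pairwise (· ≤ ·) := PySem.List.sorted_pairwise arr (fun x => x)
  obtain ⟨hL, hR⟩ := bisect_counts s target hp
  have hperm : s.Perm arr := PySem.List.sorted_perm arr (fun x => x) false
  have hc : s.count target = arr.count target := hperm.count_eq target
  have := countP_le_split s target
  omega

theorem count_or_sum_spec : Claim_equal_count_or_sum := by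
  intro arr target ct _
  unfold Spec_count_or_sum count_or_sum count_or_sum_alt
  rw [loop_eq, ← PySem.Dict.counter_eq_foldl]
  simp only [PySem.Dict.contains_counter, PySem.Dict.getD_counter, zero_add]
  have hrw := run_width arr target
  set s := PySem.List.sorted arr (fun x => x) false with hsdef
  set lo := PySem.List.bisectLeft s target with hlo
  set hi := PySem.List.bisectRight s target with hhi
  have hmem : target ∈ arr ↔ arr.count target ≠ 0 := by
    simp [List.count_pos_iff.symm, Nat.pos_iff_ne_zero]
  by_cases hm : target ∈ arr
  · have hc0 : arr.count target ≠ 0 := hmem.mp hm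
    have hne : ¬ lo = hi := by omega
    have hcast : (hi : Int) - (lo : Int) = (arr.count target : Int) := by
      rw [hrw]; push_cast; ring
    rw [if_neg hne, hcast]
    by_cases hgt : (arr.count target : Int) > ct
    · simp [hm, hgt]
    · simp [hm, hgt]
  · have hc0 : arr.count target = 0 := by
      by_contra h; exact hm (hmem.mpr h)
    have heq : lo = hi := by omega
    simp [hm, heq]
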